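-- pv_equiv track=rewrite | github.com/Arthur-Dauphole/Projet-BRAIN | Arthur_2/BRAIN_PROJECT/modules/detector.py | _is_l_shape
-- ===== SOURCE A (Python) =====
-- def _is_l_shape(pixel_set: set, min_r: int, min_c: int,
--                 max_r: int, max_c: int, height: int, width: int, area: int) -> bool:
--     """Check if pixels form an L shape (any orientation)."""
--     if height < 2 or width < 2:
--         return False
--
--     # L shape area: height + width - 1
--     expected_area = height + width - 1
--     if area != expected_area:
--         return False
--
--     # Check 4 L orientations
--     corners = [
--         (min_r, min_c),  # top-left corner
--         (min_r, max_c),  # top-right corner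
--         (max_r, min_c),  # bottom-left corner
--         (max_r, max_c),  # bottom-right corner
--     ]
--
--     for corner_r, corner_c in corners:
--         expected = set()
--         # Vertical part from corner
--         for r in range(min_r, max_r + 1):
--             expected.add((r, corner_c))
--         # Horizontal part from corner
--         for c in range(min_c, max_c + 1):
--             expected.add((corner_r, c))
--
--         if pixel_set == expected:
--             return True
--
--     return False
-- ===== SOURCE B (Python) =====
-- def _is_l_shape(pixel_set: set, min_r: int, min_c: int,
--                 max_r: int, max_c: int, height: int, width: int, area: int) -> bool:
--     """Check if pixels form an L shape (any orientation)."""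
--     if height < 2 or width < 2:
--         return False
--     if area != height + width - 1:
--         return False
--
--     # An L anchored at any corner is a "cross" restricted to the bounding box:
--     # one full boundary column plus one full boundary row.  All four crosses
--     # have the same number of cells, computed arithmetically:
--     v = max_r - min_r + 1
--     h = max_c - min_c + 1
--     if v < 0:
--         v = 0
--     if h < 0:
--         h = 0
--     cross_size = v + h - (1 if v > 0 and h > 0 else 0)
--
--     # A set equals a cross iff it is a subset of it and has the same size.
--     if len(pixel_set) != cross_size:
--         return False
--
--     # Single pass: fold four flags, one per corner, each saying "every pixel
--     # seen so far lies on that corner's cross".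
--     tl = tr = bl = br = True
--     for r, c in pixel_set:
--         vl = c == min_c and min_r <= r <= max_r   # on left column
--         vr = c == max_c and min_r <= r <= max_r   # on right column
--         ht = r == min_r and min_c <= c <= max_c   # on top row
--         hb = r == max_r and min_c <= c <= max_c   # on bottom row
--         tl = tl and (vl or ht)
--         tr = tr and (vr or ht)
--         bl = bl and (vl or hb)
--         br = br and (vr or hb)
--     return tl or tr or bl or br
-- ===== Notes on version B (the rewrite author's own statement) =====
-- stated objective: alternative
-- what changed: Replaces A's per-corner construction of the expected coordinate set and set equality by a cardinality argument: the cross size is computed arithmetically once, len(pixel_set) is compared against it, and a single pass over the pixels folds four subset flags (one per corner); subset plus equal cardinality implies set equality, so no expected set and no range loops are ever built.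
import Mathlib
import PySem

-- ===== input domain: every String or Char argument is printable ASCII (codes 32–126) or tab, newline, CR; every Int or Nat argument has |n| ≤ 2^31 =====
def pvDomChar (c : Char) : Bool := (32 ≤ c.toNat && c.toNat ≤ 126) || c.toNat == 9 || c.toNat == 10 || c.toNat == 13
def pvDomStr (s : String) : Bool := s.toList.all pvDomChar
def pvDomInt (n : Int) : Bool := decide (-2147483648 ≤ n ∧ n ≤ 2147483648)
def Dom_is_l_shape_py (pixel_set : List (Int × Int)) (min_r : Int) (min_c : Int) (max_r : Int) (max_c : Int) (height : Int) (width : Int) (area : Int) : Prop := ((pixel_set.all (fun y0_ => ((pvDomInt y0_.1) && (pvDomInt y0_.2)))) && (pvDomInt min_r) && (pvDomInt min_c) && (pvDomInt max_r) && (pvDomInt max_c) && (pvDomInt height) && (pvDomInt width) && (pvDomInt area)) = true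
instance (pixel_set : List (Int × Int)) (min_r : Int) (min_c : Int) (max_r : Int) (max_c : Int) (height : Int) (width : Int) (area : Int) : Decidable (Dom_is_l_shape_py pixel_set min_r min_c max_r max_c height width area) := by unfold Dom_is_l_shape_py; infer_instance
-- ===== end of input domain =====

-- B replaces A's four expected-set constructions and set-equality tests by one arithmetic
-- cardinality check plus a single pass folding four subset flags; objective: alternative.

-- ===== PORT A =====
-- expected = {(r, corner_c) : min_r ≤ r ≤ max_r} then add {(corner_r, c) : min_c ≤ c ≤ max_c},
-- built exactly as A does: two range loops adding into a set
def pvExpected (min_r : Int) (min_c : Int) (max_r : Int) (max_c : Int) (corner_r : Int) (corner_c : Int) : PySem.Set (Int × Int) :=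
  (PySem.List.pyRange min_c (max_c + 1) 1).foldl (fun s c => PySem.Set.add s (corner_r, c))
    ((PySem.List.pyRange min_r (max_r + 1) 1).foldl (fun s r => PySem.Set.add s (r, corner_c)) PySem.Set.empty)

def is_l_shape_py (pixel_set : List (Int × Int)) (min_r : Int) (min_c : Int) (max_r : Int) (max_c : Int) (height : Int) (width : Int) (area : Int) : Bool :=
  if height < 2 ∨ width < 2 then false
  else
    let expected_area := height + width - 1
    if area ≠ expected_area then false
    else
      [(min_r, min_c), (min_r, max_c), (max_r, min_c), (max_r, max_c)].any
        (fun corner => PySem.Set.equal pixel_set (pvExpected min_r min_c max_r max_c corner.1 corner.2))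

-- ===== PORT B =====
-- cross_size: number of cells of a boundary column plus a boundary row inside the box
def pvCrossSize (min_r : Int) (min_c : Int) (max_r : Int) (max_c : Int) : Int :=
  let v0 := max_r - min_r + 1
  let h0 := max_c - min_c + 1
  let v := if v0 < 0 then 0 else v0
  let h := if h0 < 0 then 0 else h0
  v + h - (if 0 < v ∧ 0 < h then 1 else 0)

-- the loop body of Source B: update the four per-corner flags with one pixel
def pvStep (min_r : Int) (min_c : Int) (max_r : Int) (max_c : Int)
    (st : Bool × Bool × Bool × Bool) (p : Int × Int) : Bool × Bool × Bool × Bool :=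
  let vl := p.2 == min_c && decide (min_r ≤ p.1) && decide (p.1 ≤ max_r)
  let vr := p.2 == max_c && decide (min_r ≤ p.1) && decide (p.1 ≤ max_r)
  let ht := p.1 == min_r && decide (min_c ≤ p.2) && decide (p.2 ≤ max_c)
  let hb := p.1 == max_r && decide (min_c ≤ p.2) && decide (p.2 ≤ max_c)
  (st.1 && (vl || ht), st.2.1 && (vr || ht), st.2.2.1 && (vl || hb), st.2.2.2 && (vr || hb))

def is_l_shape_py_alt (pixel_set : List (Int × Int)) (min_r : Int) (min_c : Int) (max_r : Int) (max_c : Int) (height : Int) (width : Int) (area : Int) : Bool :=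
  if height < 2 ∨ width < 2 then false
  else if area ≠ height + width - 1 then false
  else if PySem.List.len pixel_set ≠ pvCrossSize min_r min_c max_r max_c then false
  else
    let st := pixel_set.foldl (pvStep min_r min_c max_r max_c) (true, true, true, true)
    st.1 || st.2.1 || st.2.2.1 || st.2.2.2

-- ===== PRECONDITION & SPEC =====
-- Pre_ only states the set-representation invariant of the type convention (a Python set has
-- no duplicate elements); it excludes no input representing a Python value A accepts.
def Pre_is_l_shape_py (pixel_set : List (Int × Int)) (min_r : Int) (min_c : Int) (max_r : Int) (max_c : Int) (height : Int) (width : Int) (area : Int) : Prop := pixel_set.Nodup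
instance (pixel_set : List (Int × Int)) (min_r : Int) (min_c : Int) (max_r : Int) (max_c : Int) (height : Int) (width : Int) (area : Int) : Decidable (Pre_is_l_shape_py pixel_set min_r min_c max_r max_c height width area) := by unfold Pre_is_l_shape_py; infer_instance

def pvWitness_is_l_shape_py : (List (Int × Int)) × Int × Int × Int × Int × Int × Int × Int :=
  ([((0 : Int), (0 : Int)), (0, 1), (1, 0)], 0, 0, 1, 1, 2, 2, 3)

def Spec_is_l_shape_py (pixel_set : List (Int × Int)) (min_r : Int) (min_c : Int) (max_r : Int) (max_c : Int) (height : Int) (width : Int) (area : Int) (out : Bool) : Prop := out = is_l_shape_py_alt pixel_set min_r min_c max_r max_c height width area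
instance (pixel_set : List (Int × Int)) (min_r : Int) (min_c : Int) (max_r : Int) (max_c : Int) (height : Int) (width : Int) (area : Int) (out : Bool) : Decidable (Spec_is_l_shape_py pixel_set min_r min_c max_r max_c height width area out) := by unfold Spec_is_l_shape_py; infer_instance

-- ===== CLAIM (what is proved, stated in full; the proofs are below) =====
def Claim_equal_is_l_shape_py : Prop := ∀ (pixel_set : List (Int × Int)) (min_r : Int) (min_c : Int) (max_r : Int) (max_c : Int) (height : Int) (width : Int) (area : Int), Dom_is_l_shape_py pixel_set min_r min_c max_r max_c height width area → Pre_is_l_shape_py pixel_set min_r min_c max_r max_c height width area → Spec_is_l_shape_py pixel_set min_r min_c max_r max_c height width area (is_l_shape_py pixel_set min_r min_c max_r max_c height width area)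

-- ===== LEMMAS AND PROOFS =====

-- B's per-corner predicate: the pixel lies on the cross anchored at (corner_r, corner_c)
def pvOn (min_r : Int) (min_c : Int) (max_r : Int) (max_c : Int) (corner_r : Int) (corner_c : Int) (p : Int × Int) : Bool :=
  (p.2 == corner_c && decide (min_r ≤ p.1) && decide (p.1 ≤ max_r)) ||
  (p.1 == corner_r && decide (min_c ≤ p.2) && decide (p.2 ≤ max_c))

lemma pv_mem_pvExpected (min_r min_c max_r max_c corner_r corner_c : Int) (x : Int × Int) :
    x ∈ pvExpected min_r min_c max_r max_c corner_r corner_c ↔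
      (x.2 = corner_c ∧ min_r ≤ x.1 ∧ x.1 ≤ max_r) ∨
      (x.1 = corner_r ∧ min_c ≤ x.2 ∧ x.2 ≤ max_c) := by
  unfold pvExpected
  rw [PySem.Set.mem_foldl_add, PySem.Set.mem_foldl_add]
  simp only [PySem.Set.empty, List.not_mem_nil, false_or, PySem.List.mem_pyRange_one]
  constructor
  · rintro ((⟨r, ⟨h1, h2⟩, rfl⟩) | ⟨c, ⟨h1, h2⟩, rfl⟩)
    · exact Or.inl ⟨rfl, h1, by omega⟩
    · exact Or.inr ⟨rfl, h1, by omega⟩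
  · rintro (⟨h0, h1, h2⟩ | ⟨h0, h1, h2⟩)
    · exact Or.inl ⟨x.1, ⟨h1, by omega⟩, by rw [← h0]⟩
    · exact Or.inr ⟨x.2, ⟨h1, by omega⟩, by rw [← h0]⟩

lemma pv_pvOn_iff_mem (min_r min_c max_r max_c corner_r corner_c : Int) (p : Int × Int) :
    pvOn min_r min_c max_r max_c corner_r corner_c p = true ↔
      p ∈ pvExpected min_r min_c max_r max_c corner_r corner_c := by
  rw [pv_mem_pvExpected]
  simp [pvOn, and_assoc]

-- explicit form of A's expected set
lemma pv_pvExpected_eq (min_r min_c max_r max_c corner_r corner_c : Int) :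
    pvExpected min_r min_c max_r max_c corner_r corner_c =
      PySem.Set.update
        (PySem.Set.ofList ((PySem.List.pyRange min_r (max_r + 1) 1).map (fun r => (r, corner_c))))
        ((PySem.List.pyRange min_c (max_c + 1) 1).map (fun c => (corner_r, c))) := by
  unfold pvExpected
  rw [← PySem.Set.update_map_eq_foldl_add, ← PySem.Set.update_map_eq_foldl_add,
     PySem.Set.update_empty]

lemma pv_nodup_pvExpected (min_r min_c max_r max_c corner_r corner_c : Int) :
    (pvExpected min_r min_c max_r max_c corner_r corner_c).Nodup := by
  rw [pv_pvExpected_eq]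
  exact PySem.Set.nodup_update _ _ (PySem.Set.nodup_ofList _)

lemma pv_length_pvExpected (min_r min_c max_r max_c corner_r corner_c : Int)
    (hr : corner_r = min_r ∨ corner_r = max_r) (hc : corner_c = min_c ∨ corner_c = max_c) :
    ((pvExpected min_r min_c max_r max_c corner_r corner_c).length : Int) =
      pvCrossSize min_r min_c max_r max_c := by
  have hinjR : Function.Injective (fun r : Int => (r, corner_c)) := by
    intro a b h; simpa using h
  have hinjC : Function.Injective (fun c : Int => (corner_r, c)) := by
    intro a b h; simpa using h
  have hndR : ((PySem.List.pyRange min_r (max_r + 1) 1).map (fun r => (r, corner_c))).Nodup :=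
    (PySem.List.nodup_pyRange_one _ _).map hinjR
  have hndC : ((PySem.List.pyRange min_c (max_c + 1) 1).map (fun c => (corner_r, c))).Nodup :=
    (PySem.List.nodup_pyRange_one _ _).map hinjC
  rw [pv_pvExpected_eq, PySem.Set.update_eq_append_filter,
      PySem.Set.ofList_eq_self_of_nodup _ hndR, PySem.Set.ofList_eq_self_of_nodup _ hndC]
  simp only [PySem.Set.contains_eq_listContains]
  rw [List.filter_map]
  simp only [List.length_append, List.length_map]
  by_cases hv : min_r ≤ max_r
  · have hcont : ∀ c : Int,
        (((PySem.List.pyRange min_r (max_r + 1) 1).map (fun r => (r, corner_c))).contains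
          ((fun c : Int => (corner_r, c)) c)) = (c == corner_c) := by
      intro c
      rw [Bool.eq_iff_iff]
      simp only [List.contains_iff_mem, List.mem_map, PySem.List.mem_pyRange_one, beq_iff_eq,
        Prod.mk.injEq]
      constructor
      · rintro ⟨r, _, _, h⟩; exact h.symm
      · rintro rfl
        have hrb : min_r ≤ corner_r ∧ corner_r ≤ max_r := by
          rcases hr with rfl | rfl <;> omega
        exact ⟨corner_r, by omega, rfl, rfl⟩
    have hfc : List.filter ((fun y => !List.contains
          ((PySem.List.pyRange min_r (max_r + 1) 1).map (fun r => (r, corner_c))) y) ∘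
          (fun c : Int => (corner_r, c))) (PySem.List.pyRange min_c (max_c + 1) 1) =
        List.filter (fun c => !(c == corner_c)) (PySem.List.pyRange min_c (max_c + 1) 1) := by
      apply List.filter_congr
      intro c _
      simp only [Function.comp_apply, hcont c]
    rw [hfc]
    by_cases hh : min_c ≤ max_c
    · rcases hc with rfl | rfl
      · have hsplit : PySem.List.pyRange corner_c (max_c + 1) 1 =
            PySem.List.pyRange corner_c (corner_c + 1) 1 ++
              PySem.List.pyRange (corner_c + 1) (max_c + 1) 1 :=
          PySem.List.pyRange_one_append _ _ _ (by omega) (by omega)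
        rw [hsplit, List.filter_append, PySem.List.pyRange_one_singleton]
        have h1 : ([corner_c] : List Int).filter (fun c => !(c == corner_c)) = [] := by simp
        have h2 : (PySem.List.pyRange (corner_c + 1) (max_c + 1) 1).filter
            (fun c => !(c == corner_c)) = PySem.List.pyRange (corner_c + 1) (max_c + 1) 1 := by
          rw [List.filter_eq_self]
          intro a ha
          rw [PySem.List.mem_pyRange_one] at ha
          simp [show a ≠ corner_c from by omega]
        rw [h1, h2]
        simp only [List.length_append, List.length_nil, PySem.List.length_pyRange_one, pvCrossSize]
        omega
      · have hsplit : PySem.List.pyRange min_c (corner_c + 1) 1 =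
            PySem.List.pyRange min_c corner_c 1 ++
              PySem.List.pyRange corner_c (corner_c + 1) 1 :=
          PySem.List.pyRange_one_append _ _ _ (by omega) (by omega)
        rw [hsplit, List.filter_append, PySem.List.pyRange_one_singleton]
        have h1 : ([corner_c] : List Int).filter (fun c => !(c == corner_c)) = [] := by simp
        have h2 : (PySem.List.pyRange min_c corner_c 1).filter
            (fun c => !(c == corner_c)) = PySem.List.pyRange min_c corner_c 1 := by
          rw [List.filter_eq_self]
          intro a ha
          rw [PySem.List.mem_pyRange_one] at ha
          simp [show a ≠ corner_c from by omega]
        rw [h1, h2]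
        simp only [List.length_append, List.length_nil, PySem.List.length_pyRange_one, pvCrossSize]
        omega
    · rw [PySem.List.pyRange_one_eq_nil (by omega : max_c + 1 ≤ min_c)]
      simp only [List.filter_nil, List.length_nil, PySem.List.length_pyRange_one, pvCrossSize]
      omega
  · rw [PySem.List.pyRange_one_eq_nil (by omega : max_r + 1 ≤ min_r)]
    simp only [List.map_nil, List.length_nil]
    have hfall : List.filter ((fun y => !List.contains ([] : List (Int × Int)) y) ∘
        (fun c : Int => (corner_r, c))) (PySem.List.pyRange min_c (max_c + 1) 1) =
        PySem.List.pyRange min_c (max_c + 1) 1 := by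
      rw [List.filter_eq_self]
      intro a _
      simp
    rw [hfall]
    simp only [PySem.List.length_pyRange_one, pvCrossSize]
    omega

-- Source B's loop folds exactly the four "all pixels on this cross" flags
lemma pv_foldl_step (min_r min_c max_r max_c : Int) :
    ∀ (l : List (Int × Int)) (a b c d : Bool),
      l.foldl (pvStep min_r min_c max_r max_c) (a, b, c, d) =
        (a && l.all (pvOn min_r min_c max_r max_c min_r min_c),
         b && l.all (pvOn min_r min_c max_r max_c min_r max_c),
         c && l.all (pvOn min_r min_c max_r max_c max_r min_c),
         d && l.all (pvOn min_r min_c max_r max_c max_r max_c)) := by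
  intro l
  induction l with
  | nil => simp
  | cons x t ih =>
      intro a b c d
      simp only [List.foldl_cons, pvStep, ih, List.all_cons, pvOn, Bool.and_assoc]

-- the heart of B: a nodup set equals a cross iff it is a subset and has the cross's size
lemma pv_equal_eq_card (pixel_set : List (Int × Int)) (min_r min_c max_r max_c corner_r corner_c : Int)
    (hnd : pixel_set.Nodup)
    (hr : corner_r = min_r ∨ corner_r = max_r) (hc : corner_c = min_c ∨ corner_c = max_c) :
    PySem.Set.equal pixel_set (pvExpected min_r min_c max_r max_c corner_r corner_c) =
      (decide ((pixel_set.length : Int) = pvCrossSize min_r min_c max_r max_c) &&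
       pixel_set.all (pvOn min_r min_c max_r max_c corner_r corner_c)) := by
  have hexp := pv_nodup_pvExpected min_r min_c max_r max_c corner_r corner_c
  have hlen := pv_length_pvExpected min_r min_c max_r max_c corner_r corner_c hr hc
  rw [Bool.eq_iff_iff, PySem.Set.equal_iff, Bool.and_eq_true, decide_eq_true_eq,
      List.all_eq_true]
  constructor
  · intro h
    have hperm : pixel_set.Perm (pvExpected min_r min_c max_r max_c corner_r corner_c) :=
      (List.perm_ext_iff_of_nodup hnd hexp).mpr h
    refine ⟨by rw [← hlen, hperm.length_eq], fun p hp => ?_⟩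
    rw [pv_pvOn_iff_mem]
    exact (h p).mp hp
  · rintro ⟨hL, hall⟩
    have hsub : pixel_set ⊆ pvExpected min_r min_c max_r max_c corner_r corner_c := by
      intro p hp
      exact (pv_pvOn_iff_mem min_r min_c max_r max_c corner_r corner_c p).mp (hall p hp)
    have hlen2 : pixel_set.length = (pvExpected min_r min_c max_r max_c corner_r corner_c).length := by
      exact_mod_cast hL.trans hlen.symm
    have hperm := (List.Nodup.subperm hnd hsub).perm_of_length_le (by omega)
    intro x
    exact ⟨fun hx => hsub hx, fun hx => hperm.mem_iff.mpr hx⟩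

-- ===== VERDICT (by name: the statement is the Claim_ definition above) =====
theorem is_l_shape_py_spec : Claim_equal_is_l_shape_py := by
  intro pixel_set min_r min_c max_r max_c height width area _ hpre
  unfold Spec_is_l_shape_py is_l_shape_py is_l_shape_py_alt
  have h1 := pv_equal_eq_card pixel_set min_r min_c max_r max_c min_r min_c hpre (Or.inl rfl) (Or.inl rfl)
  have h2 := pv_equal_eq_card pixel_set min_r min_c max_r max_c min_r max_c hpre (Or.inl rfl) (Or.inr rfl)
  have h3 := pv_equal_eq_card pixel_set min_r min_c max_r max_c max_r min_c hpre (Or.inr rfl) (Or.inl rfl)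
  have h4 := pv_equal_eq_card pixel_set min_r min_c max_r max_c max_r max_c hpre (Or.inr rfl) (Or.inr rfl)
  by_cases hg1 : height < 2 ∨ width < 2
  · rw [if_pos hg1, if_pos hg1]
  · rw [if_neg hg1, if_neg hg1]
    by_cases hg2 : area ≠ height + width - 1
    · simp only [if_pos hg2]
    · simp only [if_neg hg2]
      by_cases hlen : PySem.List.len pixel_set ≠ pvCrossSize min_r min_c max_r max_c
      · rw [if_pos hlen]
        have hlen' : ¬ ((pixel_set.length : Int) = pvCrossSize min_r min_c max_r max_c) := by
          simpa using hlen
        simp only [List.any_cons, List.any_nil, h1, h2, h3, h4, hlen', decide_false,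
          Bool.false_and, Bool.or_false]
      · rw [if_neg hlen]
        have hlen' : ((pixel_set.length : Int) = pvCrossSize min_r min_c max_r max_c) := by
          simpa using not_not.mp hlen
        simp only [List.any_cons, List.any_nil, h1, h2, h3, h4, hlen', decide_true,
          Bool.true_and, Bool.or_false, pv_foldl_step, Bool.or_assoc]
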